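-- pv_equiv track=rewrite | github.com/ursakumeljfaks/Prakticna-matematika | 1.letnik/programiranje1/izpiti/izpit_5.py | valovi
-- ===== SOURCE A (Python) =====
-- def valovi(po_dnevih):
--     skupaj = 0
--     val = []
--     koncni_val = []
--     for okuzba in po_dnevih:
--         if okuzba != 0:
--             skupaj += okuzba
--         else:
--             val.append(skupaj)
--             skupaj = 0
--     for stevilo in val:
--         if stevilo != 0:
--             koncni_val.append(stevilo)
--     return koncni_val
-- ===== SOURCE B (Python) =====
-- def valovi(po_dnevih):
--     # split at zeros into raw segments, then sum the terminated ones
--     segments = [[]]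
--     for x in po_dnevih:
--         if x == 0:
--             segments.append([])
--         else:
--             segments[-1].append(x)
--     sums = [sum(seg) for seg in segments[:-1]]
--     return [s for s in sums if s != 0]
-- ===== Notes on version B (the rewrite author's own statement) =====
-- stated objective: alternative
-- what changed: B splits the list into raw segments at zeros (list-of-lists), then sums the terminated segments and filters nonzero sums, instead of A's running accumulator flushed at each zero plus a second filtering loop.
import Mathlib
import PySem

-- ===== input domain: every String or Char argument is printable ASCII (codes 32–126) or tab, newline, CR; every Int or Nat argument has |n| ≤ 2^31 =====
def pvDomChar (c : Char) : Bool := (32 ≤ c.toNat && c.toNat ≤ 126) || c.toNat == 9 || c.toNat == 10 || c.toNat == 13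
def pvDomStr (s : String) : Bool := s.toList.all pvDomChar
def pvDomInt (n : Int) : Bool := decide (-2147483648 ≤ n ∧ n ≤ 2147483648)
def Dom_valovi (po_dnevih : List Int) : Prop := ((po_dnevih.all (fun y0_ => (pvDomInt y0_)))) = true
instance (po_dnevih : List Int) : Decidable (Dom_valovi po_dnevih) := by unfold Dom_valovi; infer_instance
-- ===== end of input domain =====

-- B builds the raw segments split at zeros and sums the terminated ones, instead of A's
-- running accumulator flushed at each zero; same cost, different decomposition (objective: alternative).

-- ===== PORT A =====
def valovi (po_dnevih : List Int) : List Int :=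
  -- first loop: state (skupaj, val)
  let st := po_dnevih.foldl
    (fun (st : Int × List Int) okuzba =>
      if okuzba ≠ 0 then (st.1 + okuzba, st.2) else (0, st.2 ++ [st.1]))
    (0, [])
  -- second loop over val with accumulator koncni_val
  st.2.foldl (fun koncni_val stevilo =>
    if stevilo ≠ 0 then koncni_val ++ [stevilo] else koncni_val) []

-- ===== PORT B =====
def valovi_alt (po_dnevih : List Int) : List Int :=
  -- segments: terminated segments (segments[:-1]) paired with the current last segment
  let st := po_dnevih.foldl
    (fun (st : List (List Int) × List Int) x =>
      if x == 0 then (st.1 ++ [st.2], []) else (st.1, st.2 ++ [x]))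
    ([], [])
  let sums := st.1.map (fun seg => seg.sum)
  sums.filter (fun s => s != 0)

-- ===== PRECONDITION & SPEC =====
def Spec_valovi (po_dnevih : List Int) (out : List Int) : Prop := out = valovi_alt po_dnevih
instance (po_dnevih : List Int) (out : List Int) : Decidable (Spec_valovi po_dnevih out) := by unfold Spec_valovi; infer_instance

-- ===== CLAIM (what is proved, stated in full; the proofs are below) =====
def Claim_equal_valovi : Prop := ∀ (po_dnevih : List Int), Dom_valovi po_dnevih → Spec_valovi po_dnevih (valovi po_dnevih)

-- ===== LEMMAS AND PROOFS =====

-- The two folds stay related: A's accumulator is the sum of B's current segment,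
-- and A's list of flushed sums is the map-sum of B's terminated segments.
theorem valovi_fold_rel (l : List Int) (cur : List Int) (done : List (List Int)) :
    l.foldl (fun (st : Int × List Int) okuzba =>
      if okuzba ≠ 0 then (st.1 + okuzba, st.2) else (0, st.2 ++ [st.1]))
      (cur.sum, done.map (fun seg => seg.sum))
    = (let st := l.foldl (fun (st : List (List Int) × List Int) x =>
        if x == 0 then (st.1 ++ [st.2], []) else (st.1, st.2 ++ [x])) (done, cur);
       (st.2.sum, st.1.map (fun seg => seg.sum))) := by
  induction l generalizing cur done with
  | nil => simp
  | cons x xs ih =>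
    by_cases hx : x = 0
    · subst hx
      simpa using ih [] (done ++ [cur])
    · have h := ih (cur ++ [x]) done
      rw [List.foldl_cons, List.foldl_cons, if_pos hx, if_neg (by simp [hx])]
      simpa using h

-- A's second loop is a filter.
theorem valovi_filter_loop (l acc : List Int) :
    l.foldl (fun koncni_val stevilo =>
      if stevilo ≠ 0 then koncni_val ++ [stevilo] else koncni_val) acc
    = acc ++ l.filter (fun s => s != 0) := by
  induction l generalizing acc with
  | nil => simp
  | cons x xs ih =>
    by_cases hx : x = 0
    · rw [List.foldl_cons, if_neg (not_not.mpr hx), ih, List.filter_cons]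
      simp [hx]
    · rw [List.foldl_cons, if_pos hx, ih, List.filter_cons]
      simp [hx]

-- ===== VERDICT (by name: the statement is the Claim_ definition above) =====
theorem valovi_spec : Claim_equal_valovi := by
  intro l _
  show valovi l = valovi_alt l
  simp only [valovi, valovi_alt]
  have h := valovi_fold_rel l [] []
  simp only [List.sum_nil, List.map_nil] at h
  rw [h, valovi_filter_loop]
  simp
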